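-- pv_equiv track=rewrite | github.com/AshleyNY/Quantitative_Trading-master_neo | src/utils/fast_use_util.py | validate_stock_code
-- ===== SOURCE A (Python) =====
-- def validate_stock_code(code: str) -> bool:
--     """
--     验证股票代码是否符合中国A股市场规范
--
--     参数:
--         code: 股票代码字符串
--
--     返回:
--         bool: 股票代码是否有效
--     """
--     # 有效的A股前缀列表及对应市场
--     valid_prefix = {
--         '60': '上海主板',
--         '688': '科创板',
--         '000': '深圳主板',
--         '002': '中小板',
--         '300': '创业板',
--         '001': '深圳主板',
--         '003': '深圳主板新股',
--         '301': '创业板新股',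
--         '605': '上海主板新股',
--         '603': '上海主板'
--     }
--
--     # 基本格式检查
--     if not code:
--         return False
--
--     code = code.strip()
--
--     if not code.isdigit():
--         return False
--
--     if len(code) != 6:
--         return False
--
--     # 前缀检查
--     for prefix in valid_prefix:
--         if code.startswith(prefix):
--             return True
--
--     return False
-- ===== SOURCE B (Python) =====
-- def validate_stock_code(code: str) -> bool:
--     """
--     验证股票代码是否符合中国A股市场规范
--     (prefix recognition done by a character decision tree instead of scanning a prefix list)
--     """
--     if not code:
--         return False
--     code = code.strip()
--     if not code.isdigit() or len(code) != 6:
--         return False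
--     a, b, c = code[0], code[1], code[2]
--     if a == '6':
--         return b == '0' or (b == '8' and c == '8')
--     if a == '0':
--         return b == '0' and c in '0123'
--     if a == '3':
--         return b == '0' and c in '01'
--     return False
-- ===== Notes on version B (the rewrite author's own statement) =====
-- stated objective: alternative
-- what changed: The scan over a ten-entry prefix dict with startswith is replaced by a hand-rolled character decision tree (a trie walk on the first three characters: branch on code[0], then code[1], then code[2]), which shares the common prefixes ('60' subsumes '603'/'605'; '00x' grouped under '0''0'; '30x' under '3''0'); no loop, no dict, no startswith.
import Mathlib
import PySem

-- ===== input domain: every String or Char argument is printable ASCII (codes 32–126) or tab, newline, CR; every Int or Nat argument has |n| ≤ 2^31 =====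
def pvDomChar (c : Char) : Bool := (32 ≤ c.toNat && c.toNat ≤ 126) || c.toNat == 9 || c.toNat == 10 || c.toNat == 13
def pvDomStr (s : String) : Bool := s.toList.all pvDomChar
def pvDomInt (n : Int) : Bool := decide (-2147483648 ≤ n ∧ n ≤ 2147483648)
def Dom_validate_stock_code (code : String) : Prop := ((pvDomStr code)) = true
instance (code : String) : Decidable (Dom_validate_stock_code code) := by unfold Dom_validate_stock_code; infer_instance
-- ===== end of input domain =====

-- B replaces A's scan over a ten-entry prefix dict by a character decision tree (a trie walk
-- branching on code[0], code[1], code[2], with shared prefixes folded); objective: alternative.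

-- ===== PORT A =====
def validate_stock_code (code : String) : Bool :=
  if PySem.Str.len code = 0 then false
  else
    let code := PySem.Str.strip code
    if ¬ PySem.Str.strIsdigit code then false
    else if PySem.Str.len code ≠ 6 then false
    else
      -- for prefix in valid_prefix: if code.startswith(prefix): return True / return False
      List.any ["60", "688", "000", "002", "300", "001", "003", "301", "605", "603"]
        (fun p => PySem.Str.startswith code p)

-- ===== PORT B =====
-- Source B indexes code[0], code[1], code[2] after the len == 6 guard, so the indexing is total;
-- ported as a pattern match on the underlying character list.
def validate_stock_code_alt (code : String) : Bool :=
  if PySem.Str.len code = 0 then false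
  else
    let code := PySem.Str.strip code
    if ¬ PySem.Str.strIsdigit code || PySem.Str.len code ≠ 6 then false
    else
      match code.toList with
      | a :: b :: c :: _ =>
        if a = '6' then b == '0' || (b == '8' && c == '8')
        else if a = '0' then b == '0' && (c == '0' || c == '1' || c == '2' || c == '3')
        else if a = '3' then b == '0' && (c == '0' || c == '1')
        else false
      | _ => false

-- ===== PRECONDITION & SPEC =====
def Spec_validate_stock_code (code : String) (out : Bool) : Prop := out = validate_stock_code_alt code
instance (code : String) (out : Bool) : Decidable (Spec_validate_stock_code code out) := by unfold Spec_validate_stock_code; infer_instance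

-- ===== CLAIM (what is proved, stated in full; the proofs are below) =====
def Claim_equal_validate_stock_code : Prop := ∀ (code : String), Dom_validate_stock_code code → Spec_validate_stock_code code (validate_stock_code code)

-- ===== LEMMAS AND PROOFS =====

-- core: on the six-character digit string, A's ten-prefix loop equals B's decision tree
-- ('603'/'605' fold into the '6'→'0' branch; '000'/'001'/'002'/'003' into '0'→'0'; '300'/'301' into '3'→'0')
lemma prefix_core (a b c d e f : Char) :
    (∃ x ∈ ["60", "688", "000", "002", "300", "001", "003", "301", "605", "603"],
        PySem.Chars.startswith [a, b, c, d, e, f] x.toList = true) ↔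
    (if a = '6' then b == '0' || (b == '8' && c == '8')
     else if a = '0' then b == '0' && (c == '0' || c == '1' || c == '2' || c == '3')
     else if a = '3' then b == '0' && (c == '0' || c == '1')
     else false) = true := by
  simp [PySem.Chars.startswith, @eq_comm Char]
  split_ifs <;> simp_all <;> tauto

-- ===== VERDICT (by name: the statement is the Claim_ definition above) =====
theorem validate_stock_code_spec : Claim_equal_validate_stock_code := by
  intro code _
  unfold Spec_validate_stock_code validate_stock_code validate_stock_code_alt
  by_cases h1 : PySem.Str.len code = 0
  · rw [if_pos h1, if_pos h1]
  rw [if_neg h1, if_neg h1]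
  by_cases h2 : ¬ PySem.Str.strIsdigit (PySem.Str.strip code)
  · rw [if_pos h2]
    rw [if_pos (by simp only [PySem.Str.strIsdigit_eq, PySem.Str.toList_strip] at h2; simp [h2])]
  by_cases h3 : PySem.Str.len (PySem.Str.strip code) ≠ 6
  · rw [if_neg h2, if_pos h3]
    rw [if_pos (by simp only [PySem.Str.len_eq, PySem.Str.toList_strip] at h3; simp [h3])]
  rw [if_neg h2, if_neg h3]
  rw [if_neg (by
    simp only [PySem.Str.strIsdigit_eq, PySem.Str.len_eq, PySem.Str.toList_strip] at h2 h3
    simp [not_not.mp h2, not_ne_iff.mp h3])]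
  have hl : (PySem.Chars.strip code.toList).length = 6 := by
    have h := not_ne_iff.mp h3
    simp only [PySem.Str.len_eq, PySem.Str.toList_strip] at h
    exact_mod_cast h
  obtain ⟨a, b, c, d, e, f, hlist⟩ :
      ∃ a b c d e f, PySem.Chars.strip code.toList = [a, b, c, d, e, f] := by
    match hll : PySem.Chars.strip code.toList, hl with
    | [a, b, c, d, e, f], _ => exact ⟨a, b, c, d, e, f, rfl⟩
  simp only [PySem.Str.startswith_eq, PySem.Str.toList_strip, hlist]
  rw [Bool.eq_iff_iff]
  simp only [List.any_eq_true]
  rw [prefix_core a b c d e f]
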